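-- pv_equiv track=rewrite | github.com/MorrisWCC/codility | Lesson91/RectangleBuilderGreaterArea.py | solution
-- ===== SOURCE A (Python) =====
-- def solution(A, X):
--     # write your code in Python 3.6
--     pass
--     fence_count = {}
--
--     for size in A :
--         fence_count[size] = fence_count.get(size,0)+1
--
--     can_use_fence = []
--     pens_number = 0
--
--     for fence in fence_count:
--         if fence_count[fence] < 2:
--             continue
--         elif fence_count[fence] < 4:
--             can_use_fence.append(fence)
--         else:
--             if (fence ** 2) >= X :
--                 pens_number +=1
--             can_use_fence.append(fence)
--     can_use_fence.sort()
--     len_cuf = len(can_use_fence)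
--
--     for i in range (0 , len_cuf):
--         start = i+1
--         end = len_cuf-1
--         while start <= end :
--             mid = (start+end)//2
--             if can_use_fence[mid] * can_use_fence[i] >= X:
--                 end = mid-1
--             else:
--                 start = mid+1
--         pens_number += len_cuf - end - 1
--
--     if pens_number > 1000000000:
--         return -1
--
--     return pens_number
-- ===== SOURCE B (Python) =====
-- def solution(A, X):
--     count = {}
--     for size in A:
--         count[size] = count.get(size, 0) + 1
--     usable = sorted(f for f in count if count[f] >= 2)
--     pens = sum(1 for f in usable if count[f] >= 4 and f * f >= X)
--     n = len(usable)
--     j = n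
--     for i in range(n):
--         while j > i + 1 and usable[i] * usable[j - 1] >= X:
--             j -= 1
--         pens += n - max(j, i + 1)
--     if pens > 1000000000:
--         return -1
--     return pens
-- ===== Notes on version B (the rewrite author's own statement) =====
-- stated objective: alternative
-- what changed: Cross-pairs are counted by a single left-moving two-pointer sweep over the sorted usable-fence list (amortised O(m) after the sort) instead of an O(log m) hand-written binary search per element; Pre_ excludes lists in which some negative value occurs at least twice, because such values enter the usable-fence pool where both A's binary search and B's two-pointer assume a monotone product predicate, so on those inputs A's (and B's) count is an accident of the search path.
-- outside the precondition, e.g. on solution([0, -1, -1, 2, 0, 2], 0): A returns 3, B returns 1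
import Mathlib
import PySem

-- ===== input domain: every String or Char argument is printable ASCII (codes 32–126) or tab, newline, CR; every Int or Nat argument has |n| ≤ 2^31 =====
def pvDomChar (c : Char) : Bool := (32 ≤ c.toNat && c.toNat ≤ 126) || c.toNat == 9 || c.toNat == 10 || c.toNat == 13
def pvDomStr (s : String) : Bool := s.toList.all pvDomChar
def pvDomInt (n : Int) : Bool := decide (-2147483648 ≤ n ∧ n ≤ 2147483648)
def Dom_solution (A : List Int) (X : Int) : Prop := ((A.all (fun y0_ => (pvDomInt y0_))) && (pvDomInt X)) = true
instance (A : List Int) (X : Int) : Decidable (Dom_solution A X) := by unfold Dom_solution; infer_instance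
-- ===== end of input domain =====

-- B counts the cross pairs with a single left-moving two-pointer sweep over the sorted usable-fence list
-- instead of A's per-element hand-written binary search (alternative algorithm, same results on Pre_).

-- ===== PORT A =====
-- A's inner `while start <= end` binary-search loop, returning the final (start, end).
def pvA_bsearch (v : List Int) (X : Int) (i : Int) (start stop : Int) : Int × Int :=
  if h : start ≤ stop then
    let mid := PySem.Int.floordiv (start + stop) 2
    if X ≤ PySem.List.pyGetD v mid 0 * PySem.List.pyGetD v i 0 then
      pvA_bsearch v X i start (mid - 1)
    else
      pvA_bsearch v X i (mid + 1) stop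
  else (start, stop)
termination_by (stop + 1 - start).toNat
decreasing_by
  · have hb := PySem.Int.floordiv_two_mid_bounds h
    omega
  · have hb := PySem.Int.floordiv_two_mid_bounds h
    omega

def solution (A : List Int) (X : Int) : Int :=
  let fence_count := A.foldl (fun (d : PySem.Dict Int Int) size => d.insert size (d.getD size 0 + 1)) PySem.Dict.empty
  let st := fence_count.keys.foldl (fun (st : List Int × Int) fence =>
      if fence_count.getD fence 0 < 2 then st
      else if fence_count.getD fence 0 < 4 then (st.1 ++ [fence], st.2)
      else (st.1 ++ [fence], if X ≤ fence ^ 2 then st.2 + 1 else st.2)) ([], 0)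
  let can_use_fence := PySem.List.sorted st.1 (fun x => x) false
  let len_cuf : Int := can_use_fence.length
  let pens := (PySem.List.pyRange 0 len_cuf).foldl (fun pens i =>
      let r := pvA_bsearch can_use_fence X i (i + 1) (len_cuf - 1)
      pens + (len_cuf - r.2 - 1)) st.2
  if pens > 1000000000 then -1 else pens

-- ===== PORT B =====
-- B's inner `while j > i + 1 and usable[i] * usable[j-1] >= X` loop, returning the final j.
def pvB_sweep (v : List Int) (X : Int) (i : Int) (j : Int) : Int :=
  if h : i + 1 < j ∧ X ≤ PySem.List.pyGetD v i 0 * PySem.List.pyGetD v (j - 1) 0 then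
    pvB_sweep v X i (j - 1)
  else j
termination_by (j - i).toNat
decreasing_by omega

def solution_alt (A : List Int) (X : Int) : Int :=
  let count := A.foldl (fun (d : PySem.Dict Int Int) size => d.insert size (d.getD size 0 + 1)) PySem.Dict.empty
  let usable := PySem.List.sorted (count.keys.filter (fun f => 2 ≤ count.getD f 0)) (fun x => x) false
  let pens0 : Int := usable.countP (fun f => 4 ≤ count.getD f 0 && X ≤ f * f)
  let n : Int := usable.length
  let fin := (PySem.List.pyRange 0 n).foldl (fun (st : Int × Int) i =>
      let j := pvB_sweep usable X i st.1
      (j, st.2 + (n - max j (i + 1)))) (n, pens0)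
  if fin.2 > 1000000000 then -1 else fin.2

-- ===== PRECONDITION & SPEC =====
-- Pre_ excludes lists in which some NEGATIVE value occurs at least twice: such a value enters the sorted
-- usable-fence pool, where A's binary search (like B's two-pointer) assumes the product predicate is
-- monotone, and the count A returns there is an accident of its search path.
def Pre_solution (A : List Int) (X : Int) : Prop := ∀ v ∈ A, 2 ≤ A.count v → 0 ≤ v
instance (A : List Int) (X : Int) : Decidable (Pre_solution A X) := by unfold Pre_solution; infer_instance

def pvWitness_solution : List Int × Int := ([2, 2, 5, 5, 5, 5, -3], 9)

def Spec_solution (A : List Int) (X : Int) (out : Int) : Prop := out = solution_alt A X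
instance (A : List Int) (X : Int) (out : Int) : Decidable (Spec_solution A X out) := by unfold Spec_solution; infer_instance

-- ===== CLAIM (what is proved, stated in full; the proofs are below) =====
def Claim_equal_solution : Prop := ∀ (A : List Int) (X : Int), Dom_solution A X → Pre_solution A X → Spec_solution A X (solution A X)

-- ===== LEMMAS AND PROOFS =====

theorem pv_nonneg (v : List Int) (hnn : ∀ x ∈ v, 0 ≤ x) (i : Int) (h0 : 0 ≤ i)
    (h1 : i < (v.length : Int)) : 0 ≤ PySem.List.pyGetD v i 0 := by
  rw [PySem.List.pyGetD_eq_getElem v 0 h0 h1]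
  exact hnn _ (List.getElem_mem _)

-- A's key loop builds the filtered key list and counts the self-pairing fences.
theorem keyloopA (c : PySem.Dict Int Int) (X : Int) (l : List Int) (st : List Int × Int) :
    l.foldl (fun (st : List Int × Int) fence =>
      if c.getD fence 0 < 2 then st
      else if c.getD fence 0 < 4 then (st.1 ++ [fence], st.2)
      else (st.1 ++ [fence], if X ≤ fence ^ 2 then st.2 + 1 else st.2)) st
    = (st.1 ++ l.filter (fun f => 2 ≤ c.getD f 0),
       st.2 + (l.countP (fun f => 4 ≤ c.getD f 0 && X ≤ f ^ 2) : Int)) := by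
  induction l generalizing st with
  | nil => simp
  | cons f t ih =>
    simp only [List.foldl_cons, List.filter_cons, List.countP_cons, ih]
    by_cases h2 : c.getD f 0 < 2
    · have : ¬ (2 : Int) ≤ c.getD f 0 := by omega
      have h4 : ¬ (4 : Int) ≤ c.getD f 0 := by omega
      simp [h2, this, h4]
    · by_cases h4 : c.getD f 0 < 4
      · have h2' : (2 : Int) ≤ c.getD f 0 := by omega
        have h4' : ¬ (4 : Int) ≤ c.getD f 0 := by omega
        simp [h2, h4, h2', h4']
      · have h2' : (2 : Int) ≤ c.getD f 0 := by omega
        have h4' : (4 : Int) ≤ c.getD f 0 := by omega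
        by_cases hx : X ≤ f ^ 2
        · simp [h2, h4, h2', h4', hx]
          ring
        · simp [h2, h4, h2', h4', hx]

-- A's binary search lands on the split point of the (k-monotone) predicate restricted to [i+1, n).
theorem bsearch_spec (v : List Int) (X i : Int)
    (hmono : ∀ k k' : Int, i + 1 ≤ k → k ≤ k' → k' < (v.length : Int) →
      X ≤ PySem.List.pyGetD v i 0 * PySem.List.pyGetD v k 0 →
      X ≤ PySem.List.pyGetD v i 0 * PySem.List.pyGetD v k' 0)
    (s e : Int) (hs : i + 1 ≤ s) (he : e ≤ (v.length : Int) - 1) (hse : s ≤ e + 1)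
    (hlow : ∀ k, i + 1 ≤ k → k < s → ¬ X ≤ PySem.List.pyGetD v i 0 * PySem.List.pyGetD v k 0)
    (hhigh : ∀ k, e < k → k < (v.length : Int) → X ≤ PySem.List.pyGetD v i 0 * PySem.List.pyGetD v k 0) :
    (pvA_bsearch v X i s e).2 = (pvA_bsearch v X i s e).1 - 1 ∧
    i + 1 ≤ (pvA_bsearch v X i s e).1 ∧ (pvA_bsearch v X i s e).1 ≤ (v.length : Int) ∧
    (∀ k, i + 1 ≤ k → k < (pvA_bsearch v X i s e).1 → ¬ X ≤ PySem.List.pyGetD v i 0 * PySem.List.pyGetD v k 0) ∧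
    (∀ k, (pvA_bsearch v X i s e).1 ≤ k → k < (v.length : Int) → X ≤ PySem.List.pyGetD v i 0 * PySem.List.pyGetD v k 0) := by
  by_cases hle : s ≤ e
  · have hmb := PySem.Int.floordiv_two_mid_bounds (lo := s) (hi := e) hle
    by_cases hc : X ≤ PySem.List.pyGetD v (PySem.Int.floordiv (s + e) 2) 0 * PySem.List.pyGetD v i 0
    · have hc' : X ≤ PySem.List.pyGetD v i 0 * PySem.List.pyGetD v (PySem.Int.floordiv (s + e) 2) 0 := by
        rw [mul_comm] at hc; exact hc
      have hunf : pvA_bsearch v X i s e = pvA_bsearch v X i s (PySem.Int.floordiv (s + e) 2 - 1) := by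
        conv_lhs => rw [pvA_bsearch]
        simp only [dif_pos hle, if_pos hc]
      rw [hunf]
      exact bsearch_spec v X i hmono s (PySem.Int.floordiv (s + e) 2 - 1) hs (by omega) (by omega)
        hlow
        (fun k hk1 hk2 => by
          exact hmono (PySem.Int.floordiv (s + e) 2) k (by omega) (by omega) hk2 hc')
    · have hunf : pvA_bsearch v X i s e = pvA_bsearch v X i (PySem.Int.floordiv (s + e) 2 + 1) e := by
        conv_lhs => rw [pvA_bsearch]
        simp only [dif_pos hle, if_neg hc]
      rw [hunf]
      refine bsearch_spec v X i hmono (PySem.Int.floordiv (s + e) 2 + 1) e (by omega) he (by omega)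
        (fun k hk1 hk2 => ?_) hhigh
      by_cases hks : k < s
      · exact hlow k hk1 hks
      · intro hPk
        have : X ≤ PySem.List.pyGetD v i 0 * PySem.List.pyGetD v (PySem.Int.floordiv (s + e) 2) 0 :=
          hmono k (PySem.Int.floordiv (s + e) 2) hk1 (by omega) (by omega) hPk
        rw [mul_comm] at this
        exact hc this
  · have hunf : pvA_bsearch v X i s e = (s, e) := by
      conv_lhs => rw [pvA_bsearch]
      simp only [dif_neg hle]
    rw [hunf]
    have he' : e = s - 1 := by omega
    refine ⟨by omega, hs, by omega, hlow, fun k hk1 hk2 => hhigh k (by omega) hk2⟩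
termination_by (e + 1 - s).toNat
decreasing_by all_goals omega

-- B's sweep: from a position with the predicate true on [j, n), it lands on the split point (clamped at i+1).
theorem sweep_spec (v : List Int) (X i j : Int) (hjn : j ≤ (v.length : Int))
    (hhigh : ∀ k, j ≤ k → k < (v.length : Int) → X ≤ PySem.List.pyGetD v i 0 * PySem.List.pyGetD v k 0) :
    pvB_sweep v X i j ≤ j ∧ min j (i + 1) ≤ pvB_sweep v X i j ∧
    (∀ k, pvB_sweep v X i j ≤ k → k < (v.length : Int) → X ≤ PySem.List.pyGetD v i 0 * PySem.List.pyGetD v k 0) ∧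
    (i + 1 < pvB_sweep v X i j → ¬ X ≤ PySem.List.pyGetD v i 0 * PySem.List.pyGetD v (pvB_sweep v X i j - 1) 0) := by
  by_cases hc : i + 1 < j ∧ X ≤ PySem.List.pyGetD v i 0 * PySem.List.pyGetD v (j - 1) 0
  · have hunf : pvB_sweep v X i j = pvB_sweep v X i (j - 1) := by
      conv_lhs => rw [pvB_sweep]
      simp only [dif_pos hc]
    have hrec := sweep_spec v X i (j - 1) (by omega)
      (fun k hk1 hk2 => by
        by_cases hkj : k < j
        · have : k = j - 1 := by omega
          rw [this]; exact hc.2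
        · exact hhigh k (by omega) hk2)
    rw [hunf]
    exact ⟨by omega, by omega, hrec.2.2.1, hrec.2.2.2⟩
  · have hunf : pvB_sweep v X i j = j := by
      conv_lhs => rw [pvB_sweep]
      simp only [dif_neg hc]
    rw [hunf]
    exact ⟨le_refl _, by omega, hhigh, fun hlt hP => hc ⟨hlt, hP⟩⟩
termination_by (j - i).toNat
decreasing_by omega

-- The main counting loops agree, given sortedness (as index monotonicity) and nonnegativity.
theorem loop_eq (v : List Int) (X : Int)
    (hnn : ∀ i : Int, 0 ≤ i → i < (v.length : Int) → 0 ≤ PySem.List.pyGetD v i 0)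
    (hm : ∀ k k' : Int, 0 ≤ k → k ≤ k' → k' < (v.length : Int) →
      PySem.List.pyGetD v k 0 ≤ PySem.List.pyGetD v k' 0)
    (a j pA pB : Int) (ha : 0 ≤ a) (hpq : pA = pB) (hj0 : 0 ≤ j) (hjn : j ≤ (v.length : Int))
    (hinv : ∀ i' k : Int, a ≤ i' → i' < (v.length : Int) → j ≤ k → k < (v.length : Int) →
      X ≤ PySem.List.pyGetD v i' 0 * PySem.List.pyGetD v k 0) :
    (PySem.List.pyRange a (v.length : Int)).foldl (fun pens i =>
        pens + ((v.length : Int) - (pvA_bsearch v X i (i + 1) ((v.length : Int) - 1)).2 - 1)) pA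
    = ((PySem.List.pyRange a (v.length : Int)).foldl (fun (st : Int × Int) i =>
        (pvB_sweep v X i st.1, st.2 + ((v.length : Int) - max (pvB_sweep v X i st.1) (i + 1))))
        (j, pB)).2 := by
  by_cases han : a < (v.length : Int)
  · rw [PySem.List.pyRange_one_cons han]
    simp only [List.foldl_cons]
    have hP0 : 0 ≤ PySem.List.pyGetD v a 0 := hnn a ha han
    have hmono : ∀ k k' : Int, a + 1 ≤ k → k ≤ k' → k' < (v.length : Int) →
        X ≤ PySem.List.pyGetD v a 0 * PySem.List.pyGetD v k 0 →
        X ≤ PySem.List.pyGetD v a 0 * PySem.List.pyGetD v k' 0 := fun k k' h1 h2 h3 hPk =>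
      le_trans hPk (mul_le_mul_of_nonneg_left (hm k k' (by omega) h2 h3) hP0)
    have hbs := bsearch_spec v X a hmono (a + 1) ((v.length : Int) - 1) (le_refl _) (by omega)
      (by omega) (fun k hk1 hk2 => absurd hk1 (by omega))
      (fun k hk1 hk2 => absurd hk1 (by omega))
    have hsw := sweep_spec v X a j hjn (fun k hk1 hk2 => hinv a k (le_refl _) han hk1 hk2)
    have hj'0 : 0 ≤ pvB_sweep v X a j := by omega
    have hj'n : pvB_sweep v X a j ≤ (v.length : Int) := by omega
    have hkey : (pvA_bsearch v X a (a + 1) ((v.length : Int) - 1)).1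
        = max (pvB_sweep v X a j) (a + 1) := by
      by_cases hgt : a + 1 < pvB_sweep v X a j
      · have hneg := hsw.2.2.2 hgt
        have hr : (pvA_bsearch v X a (a + 1) ((v.length : Int) - 1)).1 = pvB_sweep v X a j := by
          by_cases h1 : (pvA_bsearch v X a (a + 1) ((v.length : Int) - 1)).1 < pvB_sweep v X a j
          · exfalso
            have hPr := hbs.2.2.2.2 _ (le_refl _) (by omega)
            exact hneg (hmono _ (pvB_sweep v X a j - 1) hbs.2.1 (by omega) (by omega) hPr)
          · by_cases h2 : pvB_sweep v X a j < (pvA_bsearch v X a (a + 1) ((v.length : Int) - 1)).1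
            · exfalso
              exact (hbs.2.2.2.1 _ (by omega) h2) (hsw.2.2.1 _ (le_refl _) (by omega))
            · omega
        omega
      · by_cases hn : a + 1 < (v.length : Int)
        · have hPa := hsw.2.2.1 (a + 1) (by omega) hn
          have : ¬ a + 1 < (pvA_bsearch v X a (a + 1) ((v.length : Int) - 1)).1 :=
            fun hlt => (hbs.2.2.2.1 (a + 1) (le_refl _) hlt) hPa
          omega
        · have := hbs.2.1
          have := hbs.2.2.1
          omega
    have hadd : pA + ((v.length : Int) - (pvA_bsearch v X a (a + 1) ((v.length : Int) - 1)).2 - 1)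
        = pB + ((v.length : Int) - max (pvB_sweep v X a j) (a + 1)) := by
      rw [hpq, hbs.1, hkey]; ring
    exact loop_eq v X hnn hm (a + 1) (pvB_sweep v X a j) _ _ (by omega) hadd hj'0
      (le_trans hsw.1 hjn)
      (fun i' k h1 h2 h3 h4 =>
        le_trans (hsw.2.2.1 k h3 h4)
          (mul_le_mul_of_nonneg_right (hm a i' ha (by omega) h2) (hnn k (by omega) h4)))
  · rw [PySem.List.pyRange_one_eq_nil (by omega)]
    simpa using hpq
termination_by ((v.length : Int) - a).toNat
decreasing_by omega

-- ===== VERDICT (by name: the statement is the Claim_ definition above) =====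
theorem solution_spec : Claim_equal_solution := by
  intro A X hD hP
  unfold Spec_solution solution solution_alt
  simp only [keyloopA, List.nil_append]
  set c := A.foldl (fun (d : PySem.Dict Int Int) size => d.insert size (d.getD size 0 + 1))
    PySem.Dict.empty with hc
  have hc2 : c = PySem.Dict.counter A := by
    rw [hc]; exact PySem.Dict.foldl_insert_getD_add_one_eq_counter A
  set w := c.keys.filter (fun f => 2 ≤ c.getD f 0) with hw
  set vs := PySem.List.sorted w (fun x => x) false with hvs
  have hmemv : ∀ x ∈ vs, 0 ≤ x := by
    intro x hx
    rw [hvs, PySem.List.mem_sorted] at hx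
    have hx' := List.mem_filter.mp hx
    have hxA : x ∈ A := by
      have hk := hx'.1
      rw [hc2, PySem.Dict.keys_counter] at hk
      exact (PySem.Set.mem_ofList A x).mp hk
    have hcnt : (2 : Int) ≤ c.getD x 0 := by simpa using hx'.2
    rw [hc2, PySem.Dict.getD_counter] at hcnt
    exact hP x hxA (by exact_mod_cast hcnt)
  have hmv : ∀ k k' : Int, 0 ≤ k → k ≤ k' → k' < (vs.length : Int) →
      PySem.List.pyGetD vs k 0 ≤ PySem.List.pyGetD vs k' 0 := by
    intro k k' h0 hkk h1
    rw [PySem.List.pyGetD_eq_getElem vs 0 h0 (by omega),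
        PySem.List.pyGetD_eq_getElem vs 0 (by omega) h1]
    exact PySem.List.sorted_id_getElem_mono w (p := k.toNat) (q := k'.toNat)
      (by omega) (by rw [← hvs]; omega)
  have hcount : ((0 : Int) + (c.keys.countP (fun f => 4 ≤ c.getD f 0 && X ≤ f ^ 2) : Int))
      = ((vs.countP (fun f => 4 ≤ c.getD f 0 && X ≤ f * f) : Nat) : Int) := by
    have h1 : vs.countP (fun f => 4 ≤ c.getD f 0 && X ≤ f * f)
        = c.keys.countP (fun f => 4 ≤ c.getD f 0 && X ≤ f ^ 2) := by
      calc vs.countP (fun f => 4 ≤ c.getD f 0 && X ≤ f * f)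
          = w.countP (fun f => 4 ≤ c.getD f 0 && X ≤ f * f) :=
            (PySem.List.sorted_perm w (fun x => x) false).countP_eq _
        _ = c.keys.countP (fun f =>
              (4 ≤ c.getD f 0 && X ≤ f * f) && decide (2 ≤ c.getD f 0)) := by
            rw [hw, List.countP_filter]
        _ = c.keys.countP (fun f => 4 ≤ c.getD f 0 && X ≤ f ^ 2) := by
            refine List.countP_congr (fun f _ => ?_)
            by_cases h4 : (4 : Int) ≤ c.getD f 0
            · have h2 : (2 : Int) ≤ c.getD f 0 := by omega
              simp [h4, h2, pow_two]
            · simp [h4]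
    omega
  have hmain := loop_eq vs X (fun i h0 h1 => pv_nonneg vs hmemv i h0 h1) hmv 0
    (vs.length : Int) _ _ (le_refl 0) hcount (by positivity) (le_refl _)
    (fun i' k h1 h2 h3 h4 => absurd h4 (by omega))
  rw [hmain]
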